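-- pv_equiv track=rewrite | github.com/nanajin/CodingTest_For_Practicing | 프로그래머스/lv0/120815. 피자 나눠 먹기 （2）/피자 나눠 먹기 （2）.py | solution
-- ===== SOURCE A (Python) =====
-- def solution(n):
--     answer = 0
--     i = 1
--     while 1:
--         value = (n * i) // 6
--         if (n * i) % 6 == 0:
--             return value
--             break
--         else:
--             i += 1
-- ===== SOURCE B (Python) =====
-- import math
--
--
-- def solution(n):
--     return n // math.gcd(n, 6)
-- ===== Notes on version B (the rewrite author's own statement) =====
-- stated objective: simpler
-- what changed: Replaced the trial-multiplier while loop with the closed form n // gcd(n, 6) (lcm(n,6)/6), a single expression.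
import Mathlib
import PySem

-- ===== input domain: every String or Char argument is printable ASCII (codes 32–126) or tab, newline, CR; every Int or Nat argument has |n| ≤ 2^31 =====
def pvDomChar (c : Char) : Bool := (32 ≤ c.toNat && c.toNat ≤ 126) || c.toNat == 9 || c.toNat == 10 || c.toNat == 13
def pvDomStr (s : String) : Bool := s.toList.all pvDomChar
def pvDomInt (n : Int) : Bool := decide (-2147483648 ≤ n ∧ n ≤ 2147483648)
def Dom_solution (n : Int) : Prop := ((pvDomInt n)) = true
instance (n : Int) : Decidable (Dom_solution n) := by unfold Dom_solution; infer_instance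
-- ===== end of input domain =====

-- B replaces A's trial-multiplier while loop with the closed form n // gcd(n, 6): simpler, same values.

-- ===== PORT A =====
-- A's `while 1` loop: try i = 1, 2, … until 6 divides n*i, then return (n*i) // 6.
-- The fuel argument only makes the recursion total: i = 6 always satisfies (n*6) % 6 == 0,
-- so starting from i = 1 with fuel 6 the 0-fuel branch is unreachable.
def solutionLoop (n : Int) (i : Int) : Nat → Int
  | 0 => 0
  | fuel + 1 =>
      if PySem.Int.mod (n * i) 6 = 0 then PySem.Int.floordiv (n * i) 6
      else solutionLoop n (i + 1) fuel

def solution (n : Int) : Int := solutionLoop n 1 6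

-- ===== PORT B =====
def solution_alt (n : Int) : Int := PySem.Int.floordiv n (Int.gcd n 6)

-- ===== PRECONDITION & SPEC =====
def Spec_solution (n : Int) (out : Int) : Prop := out = solution_alt n
instance (n : Int) (out : Int) : Decidable (Spec_solution n out) := by unfold Spec_solution; infer_instance

-- ===== CLAIM (what is proved, stated in full; the proofs are below) =====
def Claim_equal_solution : Prop := ∀ (n : Int), Dom_solution n → Spec_solution n (solution n)

-- ===== LEMMAS AND PROOFS =====

theorem gcd_six_residue (q r : Int) : Int.gcd (6*q+r) 6 = Int.gcd r 6 := by
  rw [show (6:Int)*q+r = r + q*6 by ring, Int.gcd_add_mul_right_left 6 r q]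

theorem solution_eq_alt (n : Int) : solution n = solution_alt n := by
  obtain ⟨q, r, hn, hr0, hr6⟩ : ∃ q r, n = 6*q + r ∧ 0 ≤ r ∧ r < 6 :=
    ⟨n / 6, n % 6, by omega, by omega, by omega⟩
  subst hn
  have h6 : (0:Int) < 6 := by norm_num
  interval_cases r <;>
    simp only [solution, solution_alt, solutionLoop, gcd_six_residue,
      PySem.Int.mod_eq_emod_of_pos (h := h6), PySem.Int.floordiv_eq_ediv_of_pos (h := h6)] <;>
    norm_num <;> split_ifs <;> omega

-- ===== VERDICT (by name: the statement is the Claim_ definition above) =====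
theorem solution_spec : Claim_equal_solution := by
  intro n _
  unfold Spec_solution
  exact solution_eq_alt n
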